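-- pv_equiv track=rewrite | github.com/ThomasLi666/policy_lab_2025 | seperate_events.py | find_multi_day_events
-- ===== SOURCE A (Python) =====
-- def find_multi_day_events(bool_series, min_length=2):
--     """Find intervals where True lasts for at least min_length days."""
--     in_event = False
--     events = []
--     start = None
--     for i, val in enumerate(bool_series):
--         if val and not in_event:
--             in_event = True
--             start = i
--         if (not val or i == len(bool_series)-1) and in_event:
--             end = i if not val else i+1
--             if end - start >= min_length:
--                 events.append((start, end))
--             in_event = False
--     return events
-- ===== SOURCE B (Python) =====
-- from itertools import groupby
--
-- def find_multi_day_events(bool_series, min_length=2):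
--     """Find intervals where True lasts for at least min_length days."""
--     events = []
--     offset = 0
--     for key, group in groupby(bool_series, key=bool):
--         length = len(list(group))
--         if key and length >= min_length:
--             events.append((offset, offset + length))
--         offset += length
--     return events
-- ===== Notes on version B (the rewrite author's own statement) =====
-- stated objective: idiomatic
-- what changed: Replaces the in_event/start state-machine with per-element branches and a last-index check by itertools.groupby over maximal runs, threading a running offset and emitting (offset, offset+length) for qualifying True runs.
import Mathlib
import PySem

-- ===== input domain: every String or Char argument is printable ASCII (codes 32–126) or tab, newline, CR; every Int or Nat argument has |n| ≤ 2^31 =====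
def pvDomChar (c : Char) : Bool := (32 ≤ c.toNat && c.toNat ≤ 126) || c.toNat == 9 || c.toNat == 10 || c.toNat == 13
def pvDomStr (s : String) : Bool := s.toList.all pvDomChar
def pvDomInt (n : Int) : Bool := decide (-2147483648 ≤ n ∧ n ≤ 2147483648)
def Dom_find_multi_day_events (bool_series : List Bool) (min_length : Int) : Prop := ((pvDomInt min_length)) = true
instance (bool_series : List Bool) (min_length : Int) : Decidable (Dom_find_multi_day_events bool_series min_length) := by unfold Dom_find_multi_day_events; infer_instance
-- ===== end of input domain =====

-- B replaces A's in_event/start state machine (per-element branches plus a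
-- last-index check) by itertools.groupby over maximal runs with a running offset;
-- same return value.

-- ===== PORT A =====
-- The for-loop over enumerate(bool_series): state (i, in_event, start, events);
-- `start` is Python's None-initialised variable (Option Int; only read while in_event).
def pvALoop (n m : Int) : List Bool → Int → Bool → Option Int → List (Int × Int) → List (Int × Int)
  | [], _, _, _, events => events
  | val :: rest, i, in_event, start, events =>
    let st := if val && !in_event then (true, some i) else (in_event, start)
    if (!val || i == n - 1) && st.1 then
      let e : Int := if !val then i else i + 1
      let s : Int := st.2.getD 0
      let events' := if e - s ≥ m then events ++ [(s, e)] else events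
      pvALoop n m rest (i + 1) false st.2 events'
    else
      pvALoop n m rest (i + 1) st.1 st.2 events

def find_multi_day_events (bool_series : List Bool) (min_length : Int) : List (Int × Int) :=
  pvALoop (bool_series.length : Int) min_length bool_series 0 false none []

-- ===== PORT B =====
-- groupby: peel the maximal run of the head's key, emit an event for a qualifying
-- True run, advance the offset by the run length, continue on the tail.
def pvBGroups : List Bool → Int → Int → List (Int × Int)
  | [], _, _ => []
  | b :: rest, offset, m =>
    let k := (rest.takeWhile (· == b)).length
    let length : Int := (k : Int) + 1
    (if b && decide (length ≥ m) then [(offset, offset + length)] else [])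
      ++ pvBGroups (rest.drop k) (offset + length) m
termination_by bs _ _ => bs.length
decreasing_by simp

def find_multi_day_events_alt (bool_series : List Bool) (min_length : Int) : List (Int × Int) :=
  pvBGroups bool_series 0 min_length

-- ===== PRECONDITION & SPEC =====
def Spec_find_multi_day_events (bool_series : List Bool) (min_length : Int) (out : List (Int × Int)) : Prop := out = find_multi_day_events_alt bool_series min_length
instance (bool_series : List Bool) (min_length : Int) (out : List (Int × Int)) : Decidable (Spec_find_multi_day_events bool_series min_length out) := by unfold Spec_find_multi_day_events; infer_instance

-- ===== CLAIM (what is proved, stated in full; the proofs are below) =====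
def Claim_equal_find_multi_day_events : Prop := ∀ (bool_series : List Bool) (min_length : Int), Dom_find_multi_day_events bool_series min_length → Spec_find_multi_day_events bool_series min_length (find_multi_day_events bool_series min_length)

-- ===== LEMMAS AND PROOFS =====

-- Unfolding lemmas for the two loops.
lemma bg_nil (i m : Int) : pvBGroups [] i m = [] := by rw [pvBGroups.eq_def]

lemma bg_cons (b : Bool) (rest : List Bool) (i m : Int) :
    pvBGroups (b :: rest) i m =
      (if b && decide (((rest.takeWhile (· == b)).length : Int) + 1 ≥ m)
       then [(i, i + (((rest.takeWhile (· == b)).length : Int) + 1))] else [])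
      ++ pvBGroups (rest.drop (rest.takeWhile (· == b)).length)
           (i + (((rest.takeWhile (· == b)).length : Int) + 1)) m := by
  rw [pvBGroups.eq_def]

lemma aloop_ff (n m i : Int) (rest : List Bool) (start : Option Int) (acc : List (Int × Int)) :
    pvALoop n m (false :: rest) i false start acc = pvALoop n m rest (i + 1) false start acc := by
  simp [pvALoop]

lemma aloop_tf (n m i : Int) (rest : List Bool) (start : Option Int) (acc : List (Int × Int)) :
    pvALoop n m (true :: rest) i false start acc =
      if i == n - 1 then
        pvALoop n m rest (i + 1) false (some i)
          (if i + 1 - i ≥ m then acc ++ [(i, i + 1)] else acc)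
      else pvALoop n m rest (i + 1) true (some i) acc := by
  simp [pvALoop]

lemma aloop_ft (n m i : Int) (rest : List Bool) (s : Int) (acc : List (Int × Int)) :
    pvALoop n m (false :: rest) i true (some s) acc =
      pvALoop n m rest (i + 1) false (some s) (if i - s ≥ m then acc ++ [(s, i)] else acc) := by
  simp [pvALoop]

lemma aloop_tt (n m i : Int) (rest : List Bool) (s : Int) (acc : List (Int × Int)) :
    pvALoop n m (true :: rest) i true (some s) acc =
      if i == n - 1 then
        pvALoop n m rest (i + 1) false (some s)
          (if i + 1 - s ≥ m then acc ++ [(s, i + 1)] else acc)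
      else pvALoop n m rest (i + 1) true (some s) acc := by
  simp [pvALoop]

-- A run of Falses contributes no event: peeling one False equals grouping it whole.
lemma pvBGroups_cons_false (rest : List Bool) (i m : Int) :
    pvBGroups (false :: rest) i m = pvBGroups rest (i + 1) m := by
  match rest with
  | [] => rw [bg_cons]; simp [bg_nil]
  | true :: r2 => rw [bg_cons]; simp
  | false :: r2 =>
    rw [bg_cons, bg_cons]
    simp [List.takeWhile]
    ring_nf

-- Joint loop invariant: with i + |bs| = n,
--  * out of an event, A's remaining loop appends exactly B's groups of bs at offset i;
--  * inside an event started at s (bs ≠ []), A closes it at i + (leading-True length)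
--    and then appends B's groups of the remainder.
lemma pvKey (m : Int) (bs : List Bool) : ∀ (n i : Int) (acc : List (Int × Int)),
    i + (bs.length : Int) = n →
    ((∀ start, pvALoop n m bs i false start acc = acc ++ pvBGroups bs i m) ∧
     (∀ s : Int, bs ≠ [] →
        pvALoop n m bs i true (some s) acc =
          (if i + ((bs.takeWhile (· == true)).length : Int) - s ≥ m
           then acc ++ [(s, i + ((bs.takeWhile (· == true)).length : Int))] else acc)
          ++ pvBGroups (bs.drop (bs.takeWhile (· == true)).length)
               (i + ((bs.takeWhile (· == true)).length : Int)) m)) := by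
  induction bs with
  | nil =>
    intro n i acc h
    refine ⟨fun start => ?_, fun s hne => absurd rfl hne⟩
    simp [pvALoop, bg_nil]
  | cons val rest ih =>
    intro n i acc h
    have hrest : i + 1 + (rest.length : Int) = n := by
      simp at h; omega
    have hiter : (i == n - 1) = decide (rest = []) := by
      cases rest with
      | nil =>
        have hi : i = n - 1 := by simp at h; omega
        simp [hi]
      | cons b r =>
        have hne : i ≠ n - 1 := by simp at h; omega
        have hb : (i == n - 1) = false := by simpa using hne
        rw [hb]; simp
    constructor
    · -- in_event = false on entry
      intro start
      cases val with
      | false =>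
        rw [aloop_ff, (ih n (i + 1) acc hrest).1 start, ← pvBGroups_cons_false]
      | true =>
        rw [aloop_tf, hiter]
        by_cases hr : rest = []
        · subst hr
          simp only [decide_true, if_true]
          simp only [pvALoop, bg_cons, List.takeWhile, List.length_nil,
            Nat.cast_zero, zero_add, Bool.true_and]
          split_ifs with h1 h2 h2
          · simp [bg_nil]
          · exfalso; simp only [decide_eq_true_eq] at h2; omega
          · exfalso; simp only [decide_eq_true_eq] at h2; omega
          · simp [bg_nil]
        · simp only [hr, decide_false, Bool.false_eq_true, if_false]
          rw [(ih n (i + 1) acc hrest).2 i hr, bg_cons]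
          simp only [Bool.true_and]
          have e1 : i + 1 + ((rest.takeWhile (· == true)).length : Int)
              = i + (((rest.takeWhile (· == true)).length : Int) + 1) := by ring
          rw [e1]
          split_ifs with h1 h2 h2
          · simp
          · exfalso; simp only [decide_eq_true_eq] at h2; omega
          · exfalso; simp only [decide_eq_true_eq] at h2; omega
          · simp
    · -- in_event = true on entry, run started at s
      intro s hne
      cases val with
      | false =>
        rw [aloop_ft, (ih n (i + 1) _ hrest).1 (some s)]
        simp [List.takeWhile, pvBGroups_cons_false]
      | true =>
        rw [aloop_tt, hiter]
        by_cases hr : rest = []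
        · subst hr
          simp only [decide_true, if_true]
          simp [pvALoop, bg_nil, List.takeWhile]
        · simp only [hr, decide_false, Bool.false_eq_true, if_false]
          rw [(ih n (i + 1) acc hrest).2 s hr]
          simp only [List.takeWhile, BEq.rfl, List.length_cons]
          push_cast
          have e1 : i + 1 + ((rest.takeWhile (· == true)).length : Int)
              = i + (((rest.takeWhile (· == true)).length : Int) + 1) := by ring
          rw [e1]
          have e2 : (true :: rest).drop ((rest.takeWhile (· == true)).length + 1)
              = rest.drop (rest.takeWhile (· == true)).length := by simp
          rw [e2]

-- ===== VERDICT (by name: the statement is the Claim_ definition above) =====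
theorem find_multi_day_events_spec : Claim_equal_find_multi_day_events := by
  intro bs m _
  unfold Spec_find_multi_day_events find_multi_day_events find_multi_day_events_alt
  have h := (pvKey m bs (bs.length : Int) 0 [] (by simp)).1 none
  simpa using h
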